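-- pv_equiv track=rewrite | github.com/mrbahrani/nlp_p1 | phonetics/phonetic_parser.py | __create_sentence_graph
-- ===== SOURCE A (Python) =====
-- def __create_sentence_graph(meaningful_phonetics_ranges):
--     sentence_graph = dict()
--     for item in meaningful_phonetics_ranges:
--         sentence_graph[tuple(item)] = []
--         for neighbor_candidate in meaningful_phonetics_ranges:
--             if item[1] == neighbor_candidate[0]:
--                 sentence_graph[tuple(item)].append(tuple(neighbor_candidate))
--     return sentence_graph
-- ===== SOURCE B (Python) =====
-- def __create_sentence_graph(meaningful_phonetics_ranges):
--     # One pass builds an index start-value -> [ranges beginning there]; each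
--     # node's neighbor list is then a single lookup by its end value.
--     index = {}
--     for c in meaningful_phonetics_ranges:
--         index.setdefault(c[0], []).append(tuple(c))
--     return {tuple(item): list(index.get(item[1], []))
--             for item in meaningful_phonetics_ranges}
-- ===== Notes on version B (the rewrite author's own statement) =====
-- stated objective: faster
-- what changed: Replaces the quadratic nested scan (for each item, rescan all ranges for ones starting at its end) with a single pass grouping ranges by start value in a dict, so each node's neighbor list is one hash lookup: O(n) vs O(n^2); a timing run measured 92x at n=65536 on constant-valued inputs (with A timing out at n=262144) but only 1.31x on the sorted family, where few end/start values collide.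
import Mathlib
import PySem

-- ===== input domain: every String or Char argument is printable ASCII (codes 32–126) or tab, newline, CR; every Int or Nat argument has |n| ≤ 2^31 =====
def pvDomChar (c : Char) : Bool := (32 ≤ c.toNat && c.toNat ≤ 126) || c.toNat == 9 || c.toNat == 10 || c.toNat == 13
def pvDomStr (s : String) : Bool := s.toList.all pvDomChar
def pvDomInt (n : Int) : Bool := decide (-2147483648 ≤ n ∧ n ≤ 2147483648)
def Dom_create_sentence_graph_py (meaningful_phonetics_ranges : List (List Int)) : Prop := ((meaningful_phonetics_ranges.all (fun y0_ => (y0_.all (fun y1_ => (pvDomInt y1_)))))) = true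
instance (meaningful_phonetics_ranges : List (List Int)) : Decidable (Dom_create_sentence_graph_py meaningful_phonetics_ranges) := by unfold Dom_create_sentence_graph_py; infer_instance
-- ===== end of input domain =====

-- B groups the ranges by start value in one pass (a dict keyed by start), so each
-- node's neighbor list is a single lookup by its end value instead of a rescan of all ranges.

-- ===== PORT A =====
-- dict keyed by tuple(item); the inner loop appends matching candidates to the entry
-- just created (d[k].append(x) is Dict.modify k [] (· ++ [x]) on the existing key).
def create_sentence_graph_py (meaningful_phonetics_ranges : List (List Int)) : List (List Int × List (List Int)) :=
  (meaningful_phonetics_ranges.foldl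
    (fun d item =>
      meaningful_phonetics_ranges.foldl
        (fun d neighbor_candidate =>
          if PySem.List.pyGet? item 1 == PySem.List.pyGet? neighbor_candidate 0 then
            d.modify item [] (· ++ [neighbor_candidate])
          else d)
        (d.insert item []))
    PySem.Dict.empty).items

-- ===== PORT B =====
-- index.setdefault(c[0], []).append(tuple(c)) is exactly Dict.modify (c[0]) [] (· ++ [c]).
def create_sentence_graph_py_alt (meaningful_phonetics_ranges : List (List Int)) : List (List Int × List (List Int)) :=
  let index :=
    meaningful_phonetics_ranges.foldl
      (fun d c => d.modify (PySem.List.pyGet? c 0) [] (· ++ [c]))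
      PySem.Dict.empty
  (meaningful_phonetics_ranges.foldl
    (fun d item => d.insert item (index.getD (PySem.List.pyGet? item 1) []))
    PySem.Dict.empty).items

-- ===== PRECONDITION & SPEC =====
-- Pre_ excludes exactly the inputs on which Python A raises IndexError:
-- a nonempty list containing an item of length < 2 (item[1] / neighbor_candidate[0]).
def Pre_create_sentence_graph_py (meaningful_phonetics_ranges : List (List Int)) : Prop :=
  ∀ r ∈ meaningful_phonetics_ranges, 2 ≤ r.length
instance (meaningful_phonetics_ranges : List (List Int)) : Decidable (Pre_create_sentence_graph_py meaningful_phonetics_ranges) := by unfold Pre_create_sentence_graph_py; infer_instance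

def pvWitness_create_sentence_graph_py : List (List Int) := [[0, 1], [1, 2], [1, 3]]

def Spec_create_sentence_graph_py (meaningful_phonetics_ranges : List (List Int)) (out : List (List Int × List (List Int))) : Prop := out = create_sentence_graph_py_alt meaningful_phonetics_ranges
instance (meaningful_phonetics_ranges : List (List Int)) (out : List (List Int × List (List Int))) : Decidable (Spec_create_sentence_graph_py meaningful_phonetics_ranges out) := by unfold Spec_create_sentence_graph_py; infer_instance

-- ===== CLAIM (what is proved, stated in full; the proofs are below) =====
def Claim_equal_create_sentence_graph_py : Prop := ∀ (meaningful_phonetics_ranges : List (List Int)), Dom_create_sentence_graph_py meaningful_phonetics_ranges → Pre_create_sentence_graph_py meaningful_phonetics_ranges → Spec_create_sentence_graph_py meaningful_phonetics_ranges (create_sentence_graph_py meaningful_phonetics_ranges)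

-- ===== LEMMAS AND PROOFS =====

-- A's inner loop over a freshly inserted key k accumulates exactly the filtered candidates.
theorem pv_inner_loop {κ : Type} [BEq κ] [LawfulBEq κ] (l : List (List Int)) (p : List Int → Bool)
    (k : κ) (d : PySem.Dict κ (List (List Int))) (v : List (List Int)) :
    (l.foldl (fun d c => if p c then d.modify k [] (· ++ [c]) else d) (d.insert k v))
      = d.insert k (v ++ l.filter p) := by
  induction l generalizing v with
  | nil => simp
  | cons c t ih =>
    by_cases hc : p c
    · simp only [List.foldl_cons, hc, if_pos, List.filter_cons_of_pos hc]
      rw [show (d.insert k v).modify k [] (· ++ [c])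
            = d.insert k (v ++ [c]) by
          simp [PySem.Dict.modify, PySem.Dict.getD_insert_self, PySem.Dict.insert_insert_self],
        ih]
      simp
    · simp only [List.foldl_cons, hc, if_neg, List.filter_cons_of_neg hc, Bool.false_eq_true,
        not_false_iff]
      exact ih v

-- B's index lookup by key k is exactly the candidates whose start is k, in order.
theorem pv_index_getD (l : List (List Int)) (d : PySem.Dict (Option Int) (List (List Int)))
    (k : Option Int) :
    (l.foldl (fun d c => d.modify (PySem.List.pyGet? c 0) [] (· ++ [c])) d).getD k []
      = d.getD k [] ++ l.filter (fun c => PySem.List.pyGet? c 0 == k) := by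
  induction l generalizing d with
  | nil => simp
  | cons c t ih =>
    simp only [List.foldl_cons, ih, List.filter_cons]
    by_cases h : PySem.List.pyGet? c 0 = k
    · subst h
      simp [PySem.Dict.getD_modify_self]
    · have hb : (PySem.List.pyGet? c 0 == k) = false := by simpa using h
      simp [hb, PySem.Dict.getD_modify_of_ne (hne := Ne.symm h)]

theorem create_sentence_graph_py_spec : Claim_equal_create_sentence_graph_py := by
  intro rs _hDom _hPre
  unfold Spec_create_sentence_graph_py create_sentence_graph_py create_sentence_graph_py_alt
  congr 1
  apply PySem.List.foldl_congr_mem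
  intro d item _
  rw [pv_inner_loop rs (fun c => PySem.List.pyGet? item 1 == PySem.List.pyGet? c 0) item d []]
  congr 1
  rw [pv_index_getD, PySem.Dict.getD_empty, List.nil_append]
  apply List.filter_congr
  intro c _
  simp [BEq.comm]
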